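-- pv_equiv track=rewrite | github.com/samtruelle/LO17_TD_Indexation | lemmas.py | compute_successors
-- ===== SOURCE A (Python) =====
-- def compute_successors(words: list):
--     for inspected_word in words:
--         successors = list()
--         for idx, _ in enumerate(inspected_word):
--             # letters that are different for the words with same prefix
--             different_letters = \
--                 {word[idx + 1] for word in words
--                  if len(word) > idx + 1
--                  and inspected_word[:idx + 1] == word[:idx + 1]}
--             nb_different_letter = len(different_letters)
--             if nb_different_letter > 9:
--                 nb_different_letter = 9
--             successors.append(nb_different_letter)
--         yield inspected_word, successors
-- ===== SOURCE B (Python) =====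
-- def compute_successors(words: list):
--     # One pass builds a prefix -> set-of-next-letters index; each word then
--     # just reads its prefixes' set sizes (no rescan of all words per position).
--     nexts = {}
--     for word in words:
--         for i in range(len(word) - 1):
--             nexts.setdefault(word[:i + 1], set()).add(word[i + 1])
--     for word in words:
--         yield word, [min(9, len(nexts.get(word[:i + 1], set())))
--                      for i in range(len(word))]
-- ===== Notes on version B (the rewrite author's own statement) =====
-- stated objective: faster
-- what changed: Replaces the per-word-per-position rescan of the whole word list with a single pass that builds a prefix->set-of-next-letters dictionary, then reads the capped set sizes along each word.
import Mathlib
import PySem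

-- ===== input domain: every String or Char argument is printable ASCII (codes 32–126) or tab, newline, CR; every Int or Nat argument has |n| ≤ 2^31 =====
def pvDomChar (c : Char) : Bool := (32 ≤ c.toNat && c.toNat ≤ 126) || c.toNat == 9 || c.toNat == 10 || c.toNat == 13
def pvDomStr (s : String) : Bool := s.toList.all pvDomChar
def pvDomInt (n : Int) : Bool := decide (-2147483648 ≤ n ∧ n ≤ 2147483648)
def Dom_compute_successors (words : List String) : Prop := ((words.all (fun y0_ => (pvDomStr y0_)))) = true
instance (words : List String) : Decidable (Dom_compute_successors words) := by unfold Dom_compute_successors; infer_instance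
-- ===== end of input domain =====

-- B replaces A's per-word-per-position rescan of all words with one pass that
-- builds a prefix -> set-of-next-letters dictionary (objective: faster).


-- ===== PORT A =====
-- the set comprehension {word[idx+1] for word in words if …}: filterMap in list
-- order, deduplicated first-occurrence by PySem.Set.ofList (only its size is used)
def aLetters (words : List String) (w : String) (idx : Nat) : PySem.Set Char :=
  PySem.Set.ofList (words.filterMap (fun word =>
    if word.toList.length > idx + 1 ∧ w.toList.take (idx + 1) = word.toList.take (idx + 1)
    then PySem.List.pyGet? word.toList ((idx : Int) + 1) else none))

def compute_successors (words : List String) : List (String × List Int) :=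
  words.map (fun w =>
    (w, (List.range w.toList.length).map (fun idx =>    -- for idx, _ in enumerate(w)
      let n := (aLetters words w idx).length
      ((if 9 < n then 9 else n : Nat) : Int))))

-- ===== PORT B =====
-- nexts.setdefault(word[:i+1], set()).add(word[i+1]); word[i+1] is in range since
-- i < len(word)-1, so the total getD with dummy ' ' is exact
def bAddWord (d : PySem.Dict (List Char) (PySem.Set Char)) (cs : List Char) :
    PySem.Dict (List Char) (PySem.Set Char) :=
  (List.range (cs.length - 1)).foldl (fun d i =>
    d.modify (cs.take (i + 1)) [] (fun s => PySem.Set.add s (cs.getD (i + 1) ' '))) d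

def bBuild (words : List String) : PySem.Dict (List Char) (PySem.Set Char) :=
  words.foldl (fun d w => bAddWord d w.toList) PySem.Dict.empty

def compute_successors_alt (words : List String) : List (String × List Int) :=
  let nexts := bBuild words
  words.map (fun w =>
    (w, (List.range w.toList.length).map (fun i =>
      ((min 9 ((nexts.getD (w.toList.take (i + 1)) []).length) : Nat) : Int))))

-- ===== PRECONDITION & SPEC =====
def Spec_compute_successors (words : List String) (out : List (String × List Int)) : Prop := out = compute_successors_alt words
instance (words : List String) (out : List (String × List Int)) : Decidable (Spec_compute_successors words out) := by unfold Spec_compute_successors; infer_instance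

-- ===== CLAIM (what is proved, stated in full; the proofs are below) =====
def Claim_equal_compute_successors : Prop := ∀ (words : List String), Dom_compute_successors words → Spec_compute_successors words (compute_successors words)

-- ===== LEMMAS AND PROOFS =====

-- the letters a single word contributes to the key p (at most one, at position |p|)
def contrib (p : List Char) (w : String) : Option Char :=
  if w.toList.length > p.length ∧ w.toList.take p.length = p
  then some (w.toList.getD p.length ' ') else none

-- processing one word touches key p exactly when the word extends p
def succs (words : List String) (p : List Char) : List Char :=
  words.filterMap (contrib p)

theorem bAddWord_aux (cs p : List Char) (hp : 0 < p.length) :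
    ∀ (m : Nat), m ≤ cs.length - 1 →
    ∀ (d : PySem.Dict (List Char) (PySem.Set Char)),
    ((List.range m).foldl (fun d i =>
        d.modify (cs.take (i + 1)) [] (fun s => PySem.Set.add s (cs.getD (i + 1) ' '))) d).getD p []
      = if p.length ≤ m ∧ cs.take p.length = p
        then PySem.Set.add (d.getD p []) (cs.getD p.length ' ') else d.getD p [] := by
  intro m
  induction m with
  | zero =>
    intro _ d
    rw [List.range_zero, List.foldl_nil, if_neg]
    rintro ⟨h1, _⟩; omega
  | succ m ih =>
    intro hm d
    have hm' : m ≤ cs.length - 1 := by omega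
    have hlen : m + 1 < cs.length := by omega
    rw [List.range_succ, List.foldl_append, List.foldl_cons, List.foldl_nil,
        PySem.Dict.getD_modify]
    by_cases hk : p = List.take (m + 1) cs
    · have hpl : p.length = m + 1 := by rw [hk]; simp; omega
      rw [if_pos hk, ← hk, ih hm' d, if_neg (by rintro ⟨h, _⟩; omega),
          if_pos ⟨by omega, by rw [hpl, ← hk]⟩, hpl]
    · rw [if_neg hk, ih hm' d]
      by_cases ht : List.take p.length cs = p
      · have hne : p.length ≠ m + 1 := fun h => hk (by rw [← ht, h])
        by_cases h1 : p.length ≤ m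
        · rw [if_pos ⟨h1, ht⟩, if_pos ⟨by omega, ht⟩]
        · rw [if_neg (by rintro ⟨h2, _⟩; omega), if_neg (by rintro ⟨h2, _⟩; omega)]
      · rw [if_neg (by rintro ⟨_, h⟩; exact ht h), if_neg (by rintro ⟨_, h⟩; exact ht h)]


theorem bAddWord_getD (cs p : List Char) (hp : p ≠ [])
    (d : PySem.Dict (List Char) (PySem.Set Char)) :
    (bAddWord d cs).getD p [] =
      if cs.length > p.length ∧ cs.take p.length = p
      then PySem.Set.add (d.getD p []) (cs.getD p.length ' ') else d.getD p [] := by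
  have hp0 : 0 < p.length := List.length_pos_iff.mpr hp
  unfold bAddWord
  rw [bAddWord_aux cs p hp0 (cs.length - 1) le_rfl d]
  by_cases ht : List.take p.length cs = p
  · have hle : p.length ≤ cs.length := by
      have := congrArg List.length ht; simp at this; omega
    by_cases h1 : p.length ≤ cs.length - 1
    · rw [if_pos ⟨h1, ht⟩, if_pos ⟨by omega, ht⟩]
    · rw [if_neg (by rintro ⟨h2, _⟩; omega), if_neg (by rintro ⟨h2, _⟩; omega)]
  · rw [if_neg (by rintro ⟨_, h⟩; exact ht h), if_neg (by rintro ⟨_, h⟩; exact ht h)]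

theorem bBuild_getD_aux' (p : List Char) (hp : p ≠ []) :
    ∀ (ws : List String) (d : PySem.Dict (List Char) (PySem.Set Char)),
      ((ws.foldl (fun d w => bAddWord d w.toList) d).getD p []) =
        PySem.Set.update (d.getD p []) (succs ws p) := by
  intro ws
  induction ws with
  | nil => intro d; simp [succs, PySem.Set.update_nil]
  | cons w ws ih =>
    intro d
    rw [List.foldl_cons, ih, bAddWord_getD w.toList p hp d]
    unfold succs
    rw [List.filterMap_cons]
    simp only [contrib]
    by_cases hC : w.toList.length > p.length ∧ List.take p.length w.toList = p
    · rw [if_pos hC, if_pos hC, PySem.Set.update_cons]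
    · rw [if_neg hC, if_neg hC]


theorem bBuild_getD (words : List String) (p : List Char) (hp : p ≠ []) :
    (bBuild words).getD p [] = PySem.Set.ofList (succs words p) := by
  unfold bBuild
  rw [bBuild_getD_aux' p hp words PySem.Dict.empty, PySem.Dict.getD_empty,
      PySem.Set.update_nil_left]

theorem letters_eq (words : List String) (w : String) (idx : Nat)
    (h : idx < w.toList.length) :
    aLetters words w idx = PySem.Set.ofList (succs words (w.toList.take (idx + 1))) := by
  unfold aLetters succs
  congr 1
  apply List.filterMap_congr
  intro word _
  unfold contrib
  have hpl : (w.toList.take (idx + 1)).length = idx + 1 := by rw [List.length_take]; omega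
  by_cases hC : word.toList.length > idx + 1 ∧ w.toList.take (idx + 1) = word.toList.take (idx + 1)
  · rw [if_pos hC, if_pos ⟨by omega, by rw [hpl]; exact hC.2.symm⟩, hpl]
    have hcast : (idx : Int) + 1 = ((idx + 1 : Nat) : Int) := by push_cast; ring
    rw [hcast, PySem.List.pyGet?_natCast,
        List.getElem?_eq_getElem (by omega), List.getD_eq_getElem _ _ (by omega)]
  · rw [if_neg hC, if_neg]
    rintro ⟨h1, h2⟩
    exact hC ⟨by omega, by rw [← h2, hpl]⟩

-- ===== VERDICT (by name: the statement is the Claim_ definition above) =====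
theorem compute_successors_spec : Claim_equal_compute_successors := by
  intro words _
  unfold Spec_compute_successors compute_successors compute_successors_alt
  apply List.map_congr_left
  intro w _
  simp only [Prod.mk.injEq, true_and]
  apply List.map_congr_left
  intro idx hidx
  rw [List.mem_range] at hidx
  have hne : w.toList.take (idx + 1) ≠ [] := by
    intro hnil
    have := congrArg List.length hnil
    simp only [List.length_take, List.length_nil] at this
    omega
  rw [letters_eq words w idx hidx, ← bBuild_getD words _ hne]
  have hmin : ∀ n : Nat, (if 9 < n then 9 else n) = min 9 n := by
    intro n; rw [Nat.min_def]; split_ifs <;> omega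
  rw [hmin]
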